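-- pv_equiv track=rewrite | github.com/NasirNesirli/rosalind-bioinfo | bioinformatics-stronghold/fib.py | fibonacci_rabbits
-- ===== SOURCE A (Python) =====
-- def fibonacci_rabbits(n: int, k: int):
--     """
--     Calculate rabbit population using modified Fibonacci sequence.
--
--     Each pair of rabbits produces k pairs of offspring each generation.
--     Uses recursive approach: F(n) = F(n-1) + k * F(n-2)
--
--     Args:
--         n (int): Number of months/generations
--         k (int): Number of rabbit pairs produced per reproduction
--
--     Returns:
--         int: Total number of rabbit pairs after n months
--     """
--     # Base cases: start with 1 pair, still 1 pair after first month
--     if n == 1: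
--         result = 1
--     elif n == 2:
--         result = 1
--     else:
--         # Recursive case: current pairs + k * reproducing pairs from 2 months ago
--         result = fibonacci_rabbits(n - 1, k) + k * (fibonacci_rabbits(n - 2, k))
--
--     return result
-- ===== SOURCE B (Python) =====
-- def fibonacci_rabbits(n: int, k: int):
--     # Iterative DP over F(i) = F(i-1) + k*F(i-2), starting F(1) = F(2) = 1.
--     a, b = 1, 1
--     for _ in range(n - 2):
--         a, b = b, b + k * a
--     return b
-- ===== Notes on version B (the rewrite author's own statement) =====
-- stated objective: faster
-- what changed: Replaces the naive double recursion with a bottom-up iterative loop carrying the last two values.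
import Mathlib
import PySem

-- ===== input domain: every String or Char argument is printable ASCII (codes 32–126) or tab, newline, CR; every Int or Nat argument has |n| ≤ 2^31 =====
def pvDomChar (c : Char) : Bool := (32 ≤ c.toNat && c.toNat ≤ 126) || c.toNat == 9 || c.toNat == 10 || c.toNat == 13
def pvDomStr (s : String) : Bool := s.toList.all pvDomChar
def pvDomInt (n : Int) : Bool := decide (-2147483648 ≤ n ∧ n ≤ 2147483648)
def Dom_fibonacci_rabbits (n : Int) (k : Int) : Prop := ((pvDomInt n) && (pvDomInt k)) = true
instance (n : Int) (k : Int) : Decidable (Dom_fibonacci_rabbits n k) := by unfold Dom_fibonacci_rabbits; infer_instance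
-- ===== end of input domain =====

-- B replaces A's exponential double recursion with a linear bottom-up loop; return value only.

-- ===== PORT A =====
-- A's recursion diverges for n ≤ 0 (Python hits the recursion limit); the port descends
-- on a fuel counter n.toNat, which is enough fuel exactly on the admitted inputs n ≥ 1.
def fibARec (k : Int) : Nat → Int → Int
  | 0, _ => 0
  | fuel + 1, n =>
    if n = 1 then 1
    else if n = 2 then 1
    else fibARec k fuel (n - 1) + k * fibARec k fuel (n - 2)

def fibonacci_rabbits (n : Int) (k : Int) : Int := fibARec k n.toNat n

-- ===== PORT B =====
-- for _ in range(n - 2): a, b = b, b + k*a  (Python range is empty for n - 2 ≤ 0, as is toNat)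
def fibonacci_rabbits_alt (n : Int) (k : Int) : Int :=
  ((List.range (n - 2).toNat).foldl (fun (ab : Int × Int) _ => (ab.2, ab.2 + k * ab.1)) (1, 1)).2

-- ===== PRECONDITION & SPEC =====
-- A returns only for n ≥ 1; for n ≤ 0 the recursion never reaches a base case (RecursionError).
def Pre_fibonacci_rabbits (n : Int) (k : Int) : Prop := 1 ≤ n
instance (n : Int) (k : Int) : Decidable (Pre_fibonacci_rabbits n k) := by unfold Pre_fibonacci_rabbits; infer_instance
def pvWitness_fibonacci_rabbits : Int × Int := (5, 3)

def Spec_fibonacci_rabbits (n : Int) (k : Int) (out : Int) : Prop := out = fibonacci_rabbits_alt n k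
instance (n : Int) (k : Int) (out : Int) : Decidable (Spec_fibonacci_rabbits n k out) := by unfold Spec_fibonacci_rabbits; infer_instance

-- ===== CLAIM (what is proved, stated in full; the proofs are below) =====
def Claim_equal_fibonacci_rabbits : Prop := ∀ (n : Int) (k : Int), Dom_fibonacci_rabbits n k → Pre_fibonacci_rabbits n k → Spec_fibonacci_rabbits n k (fibonacci_rabbits n k)

-- ===== LEMMAS AND PROOFS =====

-- The mathematical sequence: G 0 = G 1 = 1, G (m+2) = G (m+1) + k * G m.
def G (k : Int) : Nat → Int
  | 0 => 1
  | 1 => 1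
  | m + 2 => G k (m + 1) + k * G k m

lemma fibARec_eq_G (k : Int) : ∀ (fuel : Nat) (n : Int), 1 ≤ n → n.toNat ≤ fuel →
    fibARec k fuel n = G k (n.toNat - 1) := by
  intro fuel
  induction fuel with
  | zero => intro n h1 h2; omega
  | succ f ih =>
    intro n h1 h2
    by_cases hn1 : n = 1
    · subst hn1; simp [fibARec, G]
    by_cases hn2 : n = 2
    · subst hn2; simp [fibARec, G]
    have h3 : 3 ≤ n := by omega
    have e1 := ih (n - 1) (by omega) (by omega)
    have e2 := ih (n - 2) (by omega) (by omega)
    have hm : ∃ m : Nat, n.toNat = m + 3 := ⟨n.toNat - 3, by omega⟩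
    obtain ⟨m, hm⟩ := hm
    have h1' : (n - 1).toNat = m + 2 := by omega
    have h2' : (n - 2).toNat = m + 1 := by omega
    simp only [fibARec, if_neg hn1, if_neg hn2, e1, e2, h1', h2', hm]
    simp [G]

lemma foldl_eq_G (k : Int) : ∀ m : Nat,
    ((List.range m).foldl (fun (ab : Int × Int) _ => (ab.2, ab.2 + k * ab.1)) (1, 1)) = (G k m, G k (m + 1)) := by
  intro m
  induction m with
  | zero => simp [G]
  | succ m ih =>
    rw [List.range_succ, List.foldl_append, ih]
    simp [G]

-- ===== VERDICT (by name: the statement is the Claim_ definition above) =====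
theorem fibonacci_rabbits_spec : Claim_equal_fibonacci_rabbits := by
  intro n k _ hpre
  show fibonacci_rabbits n k = fibonacci_rabbits_alt n k
  unfold fibonacci_rabbits fibonacci_rabbits_alt
  rw [fibARec_eq_G k n.toNat n hpre (le_refl _), foldl_eq_G]
  have hpre' : (1 : Int) ≤ n := hpre
  by_cases h1 : n = 1
  · subst h1
    have h : ((1:Int) - 2).toNat + 1 = 1 := by decide
    rw [h]; simp [G]
  · have : (n - 2).toNat + 1 = n.toNat - 1 := by omega
    rw [this]
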